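-- pv_equiv track=rewrite | github.com/sverrier/osu-alternative | bot/cogs/completion.py | _generate_numeric_ranges
-- ===== SOURCE A (Python) =====
-- def _generate_numeric_ranges(min_val, max_val, precision):
--     """Generate numeric ranges based on min, max, and precision."""
--     ranges = []
--     current = min_val
--     while current < max_val:
--         next_val = current + precision
--         if next_val >= max_val:
--             ranges.append((current, None))
--             break
--         ranges.append((current, next_val))
--         current = next_val
--     return ranges
-- ===== SOURCE B (Python) =====
-- def _generate_numeric_ranges(min_val, max_val, precision):
--     """Closed-form: compute the number of steps by ceiling division, build the
--     boundary starts directly, then pair each start with its successor (None last)."""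
--     diff = max_val - min_val
--     if diff <= 0:
--         return []
--     n = -(-diff // precision)  # ceil(diff / precision); precision > 0 on the stated domain
--     starts = [min_val + i * precision for i in range(n)]
--     return [(s, s + precision) for s in starts[:-1]] + [(starts[-1], None)]
-- ===== Notes on version B (the rewrite author's own statement) =====
-- stated objective: alternative
-- what changed: Replaces A's break-driven while loop that accumulates pairs by repeated addition with a closed form: one ceiling division computes the step count, the boundary starts are built directly, and consecutive boundaries are paired (None for the last).
import Mathlib
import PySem

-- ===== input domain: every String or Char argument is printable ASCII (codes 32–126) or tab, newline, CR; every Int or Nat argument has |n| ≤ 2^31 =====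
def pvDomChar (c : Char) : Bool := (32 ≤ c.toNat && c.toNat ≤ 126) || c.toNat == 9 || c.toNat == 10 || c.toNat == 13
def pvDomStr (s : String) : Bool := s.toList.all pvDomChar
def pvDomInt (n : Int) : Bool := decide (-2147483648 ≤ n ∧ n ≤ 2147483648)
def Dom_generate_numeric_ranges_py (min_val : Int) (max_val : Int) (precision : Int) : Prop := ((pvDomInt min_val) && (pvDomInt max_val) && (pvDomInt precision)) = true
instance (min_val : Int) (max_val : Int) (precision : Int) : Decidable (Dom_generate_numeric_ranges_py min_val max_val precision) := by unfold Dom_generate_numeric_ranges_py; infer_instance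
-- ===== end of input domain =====

-- B replaces A's break-driven accumulation loop by a closed form: the step count is computed
-- by one ceiling division, the boundaries are built directly, and consecutive boundaries are paired.

-- ===== PORT A =====
-- A's while loop; fuel only makes the recursion total (it never cuts the loop short when
-- 0 < precision: the loop runs at most (max_val - min_val) iterations then).
def pvALoop (fuel : Nat) (current : Int) (max_val : Int) (precision : Int) : List (Int × Option Int) :=
  match fuel with
  | 0 => []
  | fuel + 1 =>
    if current < max_val then
      let next_val := current + precision
      if next_val ≥ max_val then [(current, none)]
      else (current, some next_val) :: pvALoop fuel next_val max_val precision
    else []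

def generate_numeric_ranges_py (min_val : Int) (max_val : Int) (precision : Int) : List (Int × Option Int) :=
  pvALoop ((max_val - min_val).toNat + 1) min_val max_val precision

-- ===== PORT B =====
def generate_numeric_ranges_py_alt (min_val : Int) (max_val : Int) (precision : Int) : List (Int × Option Int) :=
  let diff := max_val - min_val
  if diff ≤ 0 then []
  else
    let n := (-(PySem.Int.floordiv (-diff) precision)).toNat   -- -(-diff // precision)
    let starts := (List.range n).map (fun (i : Nat) => min_val + (i : Int) * precision)
    -- starts[:-1] pairing; starts[-1]: under Pre_ n ≥ 1, so starts is nonempty and getLastD is exact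
    (starts.dropLast.map (fun s => (s, some (s + precision)))) ++ [(starts.getLastD 0, none)]

-- ===== PRECONDITION & SPEC =====
-- Pre_ excludes exactly the inputs on which A's while loop never terminates
-- (nonpositive precision with min_val < max_val); A returns on all other inputs.
def Pre_generate_numeric_ranges_py (min_val : Int) (max_val : Int) (precision : Int) : Prop :=
  0 < precision ∨ max_val ≤ min_val
instance (min_val : Int) (max_val : Int) (precision : Int) : Decidable (Pre_generate_numeric_ranges_py min_val max_val precision) := by unfold Pre_generate_numeric_ranges_py; infer_instance

def pvWitness_generate_numeric_ranges_py : Int × Int × Int := (0, 10, 3)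

def Spec_generate_numeric_ranges_py (min_val : Int) (max_val : Int) (precision : Int) (out : List (Int × Option Int)) : Prop := out = generate_numeric_ranges_py_alt min_val max_val precision
instance (min_val : Int) (max_val : Int) (precision : Int) (out : List (Int × Option Int)) : Decidable (Spec_generate_numeric_ranges_py min_val max_val precision out) := by unfold Spec_generate_numeric_ranges_py; infer_instance

-- ===== CLAIM (what is proved, stated in full; the proofs are below) =====
def Claim_equal_generate_numeric_ranges_py : Prop := ∀ (min_val : Int) (max_val : Int) (precision : Int), Dom_generate_numeric_ranges_py min_val max_val precision → Pre_generate_numeric_ranges_py min_val max_val precision → Spec_generate_numeric_ranges_py min_val max_val precision (generate_numeric_ranges_py min_val max_val precision)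

-- ===== LEMMAS AND PROOFS =====

-- B's body for a given step count n and start m (proof-side restatement of alt's else-branch)
def pvBList (n : Nat) (m p : Int) : List (Int × Option Int) :=
  let starts := (List.range n).map (fun (i : Nat) => m + (i : Int) * p)
  (starts.dropLast.map (fun s => (s, some (s + p)))) ++ [(starts.getLastD 0, none)]

lemma pvBList_one (m p : Int) : pvBList 1 m p = [(m, none)] := by
  simp [pvBList]

lemma getLastD_cons_of_ne_nil (m : Int) (l : List Int) (h : l ≠ []) :
    (m :: l).getLastD 0 = l.getLastD 0 := by
  cases l with
  | nil => exact absurd rfl h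
  | cons a t => simp

lemma pvBList_succ (n : Nat) (hn : 1 ≤ n) (m p : Int) :
    pvBList (n + 1) m p = (m, some (m + p)) :: pvBList n (m + p) p := by
  have hstarts : (List.range (n + 1)).map (fun (i : Nat) => m + (i : Int) * p)
      = m :: (List.range n).map (fun (i : Nat) => (m + p) + (i : Int) * p) := by
    rw [List.range_succ_eq_map, List.map_cons, List.map_map]
    simp only [Nat.cast_zero, zero_mul, add_zero]
    congr 1
    apply List.map_congr_left
    intro i _
    simp only [Function.comp_apply]
    push_cast
    ring
  have hne : (List.range n).map (fun (i : Nat) => (m + p) + (i : Int) * p) ≠ [] := by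
    simp only [ne_eq, List.map_eq_nil_iff, List.range_eq_nil]
    omega
  simp only [pvBList, hstarts]
  rw [List.dropLast_cons_of_ne_nil hne, List.map_cons]
  rw [getLastD_cons_of_ne_nil m _ hne]
  rfl

-- the step count B computes, as a function of the current position
def pvN (current max_val precision : Int) : Nat :=
  (-(PySem.Int.floordiv (-(max_val - current)) precision)).toNat

lemma pvN_last (c M p : Int) (hp : 0 < p) (h1 : c < M) (h2 : M ≤ c + p) :
    pvN c M p = 1 := by
  have h : -(PySem.Int.floordiv (-(M - c)) p) = 1 :=
    (PySem.Int.neg_floordiv_neg_eq_iff_of_pos hp).2 (by constructor <;> omega)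
  unfold pvN
  rw [h]
  rfl

lemma pvN_step (c M p : Int) (hp : 0 < p) (h2 : c + p < M) :
    pvN c M p = pvN (c + p) M p + 1 := by
  obtain ⟨q, hq⟩ : ∃ q : Int, -(PySem.Int.floordiv (-(M - (c + p))) p) = q ∧
      (q - 1) * p < M - (c + p) ∧ M - (c + p) ≤ q * p := by
    refine ⟨-(PySem.Int.floordiv (-(M - (c + p))) p), rfl, ?_⟩
    exact (PySem.Int.neg_floordiv_neg_eq_iff_of_pos hp).1 rfl
  obtain ⟨hq1, hq2, hq3⟩ := hq
  have hqpos : 1 ≤ q := by nlinarith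
  have h : -(PySem.Int.floordiv (-(M - c)) p) = q + 1 := by
    refine (PySem.Int.neg_floordiv_neg_eq_iff_of_pos hp).2 ⟨?_, ?_⟩ <;> nlinarith
  unfold pvN
  rw [h, hq1]
  omega

lemma pvN_pos (c M p : Int) (hp : 0 < p) (h1 : c < M) : 1 ≤ pvN c M p := by
  by_cases h : M ≤ c + p
  · rw [pvN_last c M p hp h1 h]
  · rw [pvN_step c M p hp (by omega)]; omega

-- main loop invariant: enough fuel makes A's loop produce B's closed form
lemma pvALoop_eq (M p : Int) (hp : 0 < p) :
    ∀ (fuel : Nat) (c : Int), c < M → (M - c).toNat ≤ fuel →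
      pvALoop fuel c M p = pvBList (pvN c M p) c p := by
  intro fuel
  induction fuel with
  | zero => intro c h1 h2; omega
  | succ fuel ih =>
    intro c h1 h2
    rw [pvALoop]
    simp only [if_pos h1]
    by_cases hlast : c + p ≥ M
    · rw [if_pos hlast, pvN_last c M p hp h1 hlast, pvBList_one]
    · rw [not_le] at hlast
      rw [if_neg (by omega)]
      rw [ih (c + p) hlast (by omega)]
      rw [pvN_step c M p hp hlast,
        pvBList_succ _ (pvN_pos (c + p) M p hp hlast) c p]

lemma pvAlt_eq_bList (m M p : Int) (h : m < M) :
    generate_numeric_ranges_py_alt m M p = pvBList (pvN m M p) m p := by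
  simp only [generate_numeric_ranges_py_alt, pvBList, pvN]
  rw [if_neg (by omega)]

-- ===== VERDICT (by name: the statement is the Claim_ definition above) =====
theorem generate_numeric_ranges_py_spec : Claim_equal_generate_numeric_ranges_py := by
  intro m M p _ hpre
  unfold Spec_generate_numeric_ranges_py
  by_cases h : m < M
  · have hp : 0 < p := by rcases hpre with h' | h' <;> omega
    rw [pvAlt_eq_bList m M p h]
    unfold generate_numeric_ranges_py
    exact pvALoop_eq M p hp _ m h (by omega)
  · rw [not_lt] at h
    unfold generate_numeric_ranges_py generate_numeric_ranges_py_alt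
    rw [pvALoop]
    simp only [if_neg (by omega : ¬ m < M)]
    rw [if_pos (by omega)]
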